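-- pv_equiv track=rewrite | github.com/mirojasm/Calculus-App | research/splitting/cidi/module2_feasibility.py | compute_feasible_target
-- ===== SOURCE A (Python) =====
-- CELL_ORDER = ["A1","A2","A3","B1","B2","B3","C1","C2","C3","D1","D2","D3"]
--
-- PREREQ_DAG: dict[str, list[str]] = {
--     "A1": [],
--     "A2": ["A1"],
--     "A3": ["A1", "A2"],
--     "B1": ["A1"],
--     "B2": ["A2", "B1"],
--     "B3": ["A3", "B2"],
--     "C1": ["B1", "B2"],
--     "C2": ["C1", "B2"],
--     "C3": ["B3"],
--     "D1": ["C1", "A1"],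
--     "D2": ["C2", "D1"],
--     "D3": ["D2", "B3"],
-- }
--
-- _STRUCTURAL_REQS: dict[str, any] = {
--     # C2 needs at least 2 sequential sub-problems with I/O dependency
--     "C2": lambda a: (
--         len(a.get("sub_problems", [])) >= 2
--         or len(a.get("information_bottlenecks", [])) >= 1
--     ),
--     # D1 needs some ambiguity or hidden connection in the problem
--     "D1": lambda a: any(
--         kw in " ".join(a.get("information_bottlenecks", [])).lower()
--         for kw in ["conexión", "connection", "hidden", "oculta", "ambig", "share", "shared"]
--     ),
--     # D3 needs enough sub-problems to allow role re-distribution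
--     "D3": lambda a: len(a.get("sub_problems", [])) >= 3,
-- }
--
-- def close_under_prerequisites(target_cells: list[str]) -> list[str]:
--     """
--     Complete target into the minimal upset of the DAG that contains it.
--     Returns sorted list (CELL_ORDER order).
--     """
--     closed: set[str] = set(target_cells)
--     changed = True
--     while changed:
--         changed = False
--         for cell in list(closed):
--             for prereq in PREREQ_DAG.get(cell, []):
--                 if prereq not in closed:
--                     closed.add(prereq)
--                     changed = True
--     return [c for c in CELL_ORDER if c in closed]
--
-- def check_structural_feasibility(
--     cell: str, anatomy: dict
-- ) -> tuple[bool, str]: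
--     """
--     Verify that the problem anatomy supports activating `cell`.
--     Returns (is_feasible, reason).
--     """
--     req = _STRUCTURAL_REQS.get(cell)
--     if req is None:
--         return True, "no structural constraint for this cell"
--     feasible = req(anatomy)
--     if feasible:
--         return True, "ok"
--     return False, f"Cell {cell} requires richer problem structure (see STRUCTURAL_REQS)"
--
-- def compute_feasible_target(
--     target_cells: list[str], anatomy: dict
-- ) -> tuple[list[str], list[str], list[str]]:
--     """
--     Given a target CPP and problem anatomy:
--     1. Close under prerequisites
--     2. Check structural feasibility per cell
--     Returns:
--         closed_target   — target after prerequisite closure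
--         feasible_target — cells that are both in closed_target and structurally feasible
--         infeasible      — cells dropped due to structural infeasibility
--     """
--     closed = close_under_prerequisites(target_cells)
--     feasible, infeasible = [], []
--     for cell in closed:
--         ok, _ = check_structural_feasibility(cell, anatomy)
--         (feasible if ok else infeasible).append(cell)
--     return closed, feasible, infeasible
-- ===== SOURCE B (Python) =====
-- CELL_ORDER = ["A1","A2","A3","B1","B2","B3","C1","C2","C3","D1","D2","D3"]
--
-- PREREQ_DAG = {
--     "A1": [],
--     "A2": ["A1"],
--     "A3": ["A1", "A2"],
--     "B1": ["A1"],
--     "B2": ["A2", "B1"],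
--     "B3": ["A3", "B2"],
--     "C1": ["B1", "B2"],
--     "C2": ["C1", "B2"],
--     "C3": ["B3"],
--     "D1": ["C1", "A1"],
--     "D2": ["C2", "D1"],
--     "D3": ["D2", "B3"],
-- }
--
-- _D1_KEYWORDS = ["conexión", "connection", "hidden", "oculta", "ambig", "share", "shared"]
--
--
-- def _structurally_ok(cell, anatomy):
--     """Direct boolean form of the structural feasibility test for one cell."""
--     if cell == "C2":
--         return (len(anatomy.get("sub_problems", [])) >= 2
--                 or len(anatomy.get("information_bottlenecks", [])) >= 1)
--     if cell == "D1":
--         blob = " ".join(anatomy.get("information_bottlenecks", [])).lower()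
--         return any(kw in blob for kw in _D1_KEYWORDS)
--     if cell == "D3":
--         return len(anatomy.get("sub_problems", [])) >= 3
--     return True
--
--
-- def compute_feasible_target(target_cells, anatomy):
--     # Worklist DFS closure: each reachable cell is expanded exactly once.
--     closed = set(target_cells)
--     stack = list(target_cells)
--     while stack:
--         cell = stack.pop()
--         for p in PREREQ_DAG.get(cell, []):
--             if p not in closed:
--                 closed.add(p)
--                 stack.append(p)
--     closed_list = [c for c in CELL_ORDER if c in closed]
--     feasible = [c for c in closed_list if _structurally_ok(c, anatomy)]
--     infeasible = [c for c in closed_list if not _structurally_ok(c, anatomy)]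
--     return closed_list, feasible, infeasible
-- ===== Notes on version B (the rewrite author's own statement) =====
-- stated objective: alternative
-- what changed: The while-changed fixpoint that rescans the whole closed set each pass is replaced by a worklist DFS that expands each reachable cell exactly once, the per-cell feasibility lambdas dict by a direct boolean predicate, and the feasible/infeasible accumulator loop by two comprehensions (filters) over the closed list.
import Mathlib
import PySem

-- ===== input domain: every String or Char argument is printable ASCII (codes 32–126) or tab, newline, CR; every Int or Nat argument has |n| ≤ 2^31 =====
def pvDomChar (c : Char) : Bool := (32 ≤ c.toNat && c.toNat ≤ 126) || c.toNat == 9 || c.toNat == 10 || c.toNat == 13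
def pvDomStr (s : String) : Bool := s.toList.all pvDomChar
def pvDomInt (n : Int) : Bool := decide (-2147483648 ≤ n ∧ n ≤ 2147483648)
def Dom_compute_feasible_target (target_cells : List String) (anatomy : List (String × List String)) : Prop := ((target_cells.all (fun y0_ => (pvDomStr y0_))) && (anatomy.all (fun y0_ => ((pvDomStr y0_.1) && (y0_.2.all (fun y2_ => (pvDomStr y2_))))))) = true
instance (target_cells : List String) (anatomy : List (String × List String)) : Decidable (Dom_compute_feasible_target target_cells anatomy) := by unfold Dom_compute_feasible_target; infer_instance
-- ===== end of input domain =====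

-- B replaces A's while-changed fixpoint rescans by a single-visit worklist DFS and the
-- feasibility fold by two filters (objective: alternative; equal return values proved below).


-- module constants shared by both Pythons
def pvCellOrder : List String := ["A1","A2","A3","B1","B2","B3","C1","C2","C3","D1","D2","D3"]

def pvPrereqDag : PySem.Dict String (List String) := PySem.Dict.ofList
  [("A1", []), ("A2", ["A1"]), ("A3", ["A1", "A2"]), ("B1", ["A1"]), ("B2", ["A2", "B1"]),
   ("B3", ["A3", "B2"]), ("C1", ["B1", "B2"]), ("C2", ["C1", "B2"]), ("C3", ["B3"]),
   ("D1", ["C1", "A1"]), ("D2", ["C2", "D1"]), ("D3", ["D2", "B3"])]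

-- PREREQ_DAG.get(cell, [])
def pvDagGet (cell : String) : List String := pvPrereqDag.getD cell []

-- ===== PORT A =====
-- inner 'for prereq in PREREQ_DAG.get(cell, []): if prereq not in closed: closed.add(prereq); changed = True'
def pvInnerA (acc : PySem.Set String × Bool) (ps : List String) : PySem.Set String × Bool :=
  ps.foldl (fun a p => if PySem.Set.contains a.1 p then a else (PySem.Set.add a.1 p, true)) acc

-- one pass 'changed = False; for cell in list(closed): …'
def pvPassA (s : PySem.Set String) : PySem.Set String × Bool :=
  s.foldl (fun a cell => pvInnerA a (pvDagGet cell)) (s, false)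

-- 'while changed:' — fuel 13 always suffices: a pass that sets changed adds at least one of the
-- 12 DAG cells to closed, so at most 12 changing passes happen (proved in pvWhileA_closed below).
def pvWhileA : Nat → PySem.Set String → PySem.Set String
  | 0, s => s
  | n+1, s => if (pvPassA s).2 then pvWhileA n (pvPassA s).1 else (pvPassA s).1

def close_under_prerequisites (target_cells : List String) : List String :=
  let closed := pvWhileA 13 (PySem.Set.ofList target_cells)
  pvCellOrder.filter (fun c => PySem.Set.contains closed c)

-- _STRUCTURAL_REQS: dict of lambdas over the anatomy dict (the three lambdas are named here)
def pvReqC2 (a : PySem.Dict String (List String)) : Bool :=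
  decide (2 ≤ (a.getD "sub_problems" []).length) ||
  decide (1 ≤ (a.getD "information_bottlenecks" []).length)

def pvReqD1 (a : PySem.Dict String (List String)) : Bool :=
  (["conexión", "connection", "hidden", "oculta", "ambig", "share", "shared"]).any
    (fun kw => PySem.Str.isIn kw (PySem.Str.lower (PySem.Str.join " " (a.getD "information_bottlenecks" []))))

def pvReqD3 (a : PySem.Dict String (List String)) : Bool :=
  decide (3 ≤ (a.getD "sub_problems" []).length)

def pvStructuralReqs : PySem.Dict String (PySem.Dict String (List String) → Bool) :=
  PySem.Dict.ofList [("C2", pvReqC2), ("D1", pvReqD1), ("D3", pvReqD3)]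

def check_structural_feasibility (cell : String) (anatomy : List (String × List String)) : Bool × String :=
  match pvStructuralReqs.get? cell with
  | none => (true, "no structural constraint for this cell")
  | some req =>
    if req (PySem.Dict.mk anatomy) then (true, "ok")
    else (false, "Cell " ++ cell ++ " requires richer problem structure (see STRUCTURAL_REQS)")

def compute_feasible_target (target_cells : List String) (anatomy : List (String × List String)) : List String × List String × List String :=
  let closed := close_under_prerequisites target_cells
  let fi := closed.foldl
    (fun (acc : List String × List String) cell =>
      if (check_structural_feasibility cell anatomy).1 then (acc.1 ++ [cell], acc.2)
      else (acc.1, acc.2 ++ [cell])) ([], [])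
  (closed, fi.1, fi.2)

-- ===== PORT B =====
def pvD1Keywords : List String := ["conexión", "connection", "hidden", "oculta", "ambig", "share", "shared"]

-- _structurally_ok: direct boolean if-chain
def pvOk (cell : String) (anatomy : List (String × List String)) : Bool :=
  if cell == "C2" then
    decide (2 ≤ ((PySem.Dict.mk anatomy).getD "sub_problems" []).length) ||
    decide (1 ≤ ((PySem.Dict.mk anatomy).getD "information_bottlenecks" []).length)
  else if cell == "D1" then
    pvD1Keywords.any (fun kw => PySem.Str.isIn kw
      (PySem.Str.lower (PySem.Str.join " " ((PySem.Dict.mk anatomy).getD "information_bottlenecks" []))))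
  else if cell == "D3" then
    decide (3 ≤ ((PySem.Dict.mk anatomy).getD "sub_problems" []).length)
  else true

-- 'for p in PREREQ_DAG.get(cell, []): if p not in closed: closed.add(p); stack.append(p)'
-- (the stack is kept top-first: Python appends to and pops from the list's end)
def pvInnerB (acc : PySem.Set String × List String) (ps : List String) : PySem.Set String × List String :=
  ps.foldl (fun a p => if PySem.Set.contains a.1 p then a else (PySem.Set.add a.1 p, p :: a.2)) acc

-- 'while stack:' — fuel |target_cells| + 13 bounds the number of pops: every push beyond the
-- initial stack adds a new one of the 12 DAG cells to closed (proved in pvLoopB_closed below).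
def pvLoopB : Nat → PySem.Set String → List String → PySem.Set String
  | 0, seen, _ => seen
  | _+1, seen, [] => seen
  | n+1, seen, cell :: rest =>
      pvLoopB n (pvInnerB (seen, rest) (pvDagGet cell)).1 (pvInnerB (seen, rest) (pvDagGet cell)).2

def compute_feasible_target_alt (target_cells : List String) (anatomy : List (String × List String)) : List String × List String × List String :=
  let seen := pvLoopB (target_cells.length + 13) (PySem.Set.ofList target_cells) target_cells.reverse
  let closed := pvCellOrder.filter (fun c => PySem.Set.contains seen c)
  (closed, closed.filter (fun c => pvOk c anatomy), closed.filter (fun c => !(pvOk c anatomy)))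

-- ===== PRECONDITION & SPEC =====
def Spec_compute_feasible_target (target_cells : List String) (anatomy : List (String × List String)) (out : List String × List String × List String) : Prop := out = compute_feasible_target_alt target_cells anatomy
instance (target_cells : List String) (anatomy : List (String × List String)) (out : List String × List String × List String) : Decidable (Spec_compute_feasible_target target_cells anatomy out) := by unfold Spec_compute_feasible_target; infer_instance

-- ===== CLAIM (what is proved, stated in full; the proofs are below) =====
def Claim_equal_compute_feasible_target : Prop := ∀ (target_cells : List String) (anatomy : List (String × List String)), Dom_compute_feasible_target target_cells anatomy → Spec_compute_feasible_target target_cells anatomy (compute_feasible_target target_cells anatomy)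

-- ===== LEMMAS AND PROOFS =====

-- ===== VERDICT (by name: the statement is the Claim_ definition above) =====


set_option maxHeartbeats 1000000 in
lemma pvPrereqDag_eq : pvPrereqDag = PySem.Dict.mk
  [("A1", []), ("A2", ["A1"]), ("A3", ["A1", "A2"]), ("B1", ["A1"]), ("B2", ["A2", "B1"]),
   ("B3", ["A3", "B2"]), ("C1", ["B1", "B2"]), ("C2", ["C1", "B2"]), ("C3", ["B3"]),
   ("D1", ["C1", "A1"]), ("D2", ["C2", "D1"]), ("D3", ["D2", "B3"])] := by decide

set_option maxHeartbeats 1000000 in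
lemma pvDagGet_mem {c x : String} (hx : x ∈ pvDagGet c) : x ∈ pvCellOrder := by
  have H : ∀ L : List String, (∀ y ∈ L, y ∈ pvCellOrder) → x ∈ L → x ∈ pvCellOrder :=
    fun L h hx => h x hx
  unfold pvDagGet at hx
  rw [pvPrereqDag_eq, PySem.Dict.getD_eq_get?_getD] at hx
  repeat rw [PySem.Dict.get?_mk_cons] at hx
  by_cases h0 : ("A1" == c) = true
  · rw [if_pos h0] at hx; simp only [Option.getD_some] at hx; exact H _ (by decide) hx
  rw [if_neg h0] at hx
  by_cases h1 : ("A2" == c) = true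
  · rw [if_pos h1] at hx; simp only [Option.getD_some] at hx; exact H _ (by decide) hx
  rw [if_neg h1] at hx
  by_cases h2 : ("A3" == c) = true
  · rw [if_pos h2] at hx; simp only [Option.getD_some] at hx; exact H _ (by decide) hx
  rw [if_neg h2] at hx
  by_cases h3 : ("B1" == c) = true
  · rw [if_pos h3] at hx; simp only [Option.getD_some] at hx; exact H _ (by decide) hx
  rw [if_neg h3] at hx
  by_cases h4 : ("B2" == c) = true
  · rw [if_pos h4] at hx; simp only [Option.getD_some] at hx; exact H _ (by decide) hx
  rw [if_neg h4] at hx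
  by_cases h5 : ("B3" == c) = true
  · rw [if_pos h5] at hx; simp only [Option.getD_some] at hx; exact H _ (by decide) hx
  rw [if_neg h5] at hx
  by_cases h6 : ("C1" == c) = true
  · rw [if_pos h6] at hx; simp only [Option.getD_some] at hx; exact H _ (by decide) hx
  rw [if_neg h6] at hx
  by_cases h7 : ("C2" == c) = true
  · rw [if_pos h7] at hx; simp only [Option.getD_some] at hx; exact H _ (by decide) hx
  rw [if_neg h7] at hx
  by_cases h8 : ("C3" == c) = true
  · rw [if_pos h8] at hx; simp only [Option.getD_some] at hx; exact H _ (by decide) hx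
  rw [if_neg h8] at hx
  by_cases h9 : ("D1" == c) = true
  · rw [if_pos h9] at hx; simp only [Option.getD_some] at hx; exact H _ (by decide) hx
  rw [if_neg h9] at hx
  by_cases h10 : ("D2" == c) = true
  · rw [if_pos h10] at hx; simp only [Option.getD_some] at hx; exact H _ (by decide) hx
  rw [if_neg h10] at hx
  by_cases h11 : ("D3" == c) = true
  · rw [if_pos h11] at hx; simp only [Option.getD_some] at hx; exact H _ (by decide) hx
  rw [if_neg h11] at hx
  rw [show ({ items := [] } : PySem.Dict String (List String)) = PySem.Dict.empty from rfl, PySem.Dict.get?_empty] at hx; simp only [Option.getD_none] at hx; cases hx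

def pvCnt (s : PySem.Set String) : Nat := (pvCellOrder.filter (fun c => decide (c ∈ s))).length

lemma pvCnt_le (s : PySem.Set String) : pvCnt s ≤ 12 :=
  le_trans (List.length_filter_le _ _) (by decide)

lemma pvCnt_lt {s t : PySem.Set String} (hsub : ∀ x, x ∈ s → x ∈ t) {x : String}
    (hxt : x ∈ t) (hxs : x ∉ s) (hcell : x ∈ pvCellOrder) : pvCnt s < pvCnt t := by
  have hsl : (pvCellOrder.filter (fun c => decide (c ∈ s))).Sublist
      (pvCellOrder.filter (fun c => decide (c ∈ t))) := by
    apply List.monotone_filter_right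
    intro a ha; simp at ha ⊢; exact hsub a ha
  rcases Nat.lt_or_ge (pvCnt s) (pvCnt t) with h | h
  · exact h
  · exfalso
    have := hsl.eq_of_length_le h
    have hxf : x ∈ pvCellOrder.filter (fun c => decide (c ∈ t)) := by simp [hxt, hcell]
    rw [← this] at hxf
    simp at hxf
    exact hxs hxf.2

lemma innerA_cons (acc : PySem.Set String × Bool) (p : String) (ps : List String) :
    pvInnerA acc (p :: ps) =
      pvInnerA (if PySem.Set.contains acc.1 p then acc else (PySem.Set.add acc.1 p, true)) ps := rfl

lemma innerA_mono {ps : List String} {acc : PySem.Set String × Bool} {x : String}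
    (hx : x ∈ acc.1) : x ∈ (pvInnerA acc ps).1 := by
  induction ps generalizing acc with
  | nil => exact hx
  | cons p ps ih =>
    rw [innerA_cons]
    split
    · exact ih hx
    · exact ih (by simp [PySem.Set.mem_add, hx])

lemma innerA_sub {ps : List String} {acc : PySem.Set String × Bool} {x : String}
    (hx : x ∈ (pvInnerA acc ps).1) : x ∈ acc.1 ∨ x ∈ ps := by
  induction ps generalizing acc with
  | nil => exact Or.inl hx
  | cons p ps ih =>
    rw [innerA_cons] at hx
    rcases ih hx with h | h
    · split at h
      · exact Or.inl h
      · simp only [PySem.Set.mem_add] at h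
        rcases h with h | h
        · exact Or.inl h
        · exact Or.inr (by simp [h])
    · exact Or.inr (by simp [h])

lemma innerA_false {ps : List String} {acc : PySem.Set String × Bool}
    (h : (pvInnerA acc ps).2 = false) : pvInnerA acc ps = acc ∧ ∀ p ∈ ps, p ∈ acc.1 := by
  induction ps generalizing acc with
  | nil => exact ⟨rfl, by simp⟩
  | cons p ps ih =>
    rw [innerA_cons] at h ⊢
    by_cases hp : p ∈ acc.1
    · rw [if_pos ((PySem.Set.contains_iff _ _).mpr hp)] at h ⊢
      obtain ⟨h1, h2⟩ := ih h
      exact ⟨h1, by simpa [hp] using h2⟩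
    · rw [if_neg (by simpa using hp)] at h
      obtain ⟨h1, -⟩ := ih h
      have : ((PySem.Set.add acc.1 p, true) : PySem.Set String × Bool).2 = false := by rw [h1] at h; exact h
      simp at this

lemma innerA_new {ps : List String} {acc : PySem.Set String × Bool}
    (h : (pvInnerA acc ps).2 = true) :
    acc.2 = true ∨ ∃ x, x ∈ (pvInnerA acc ps).1 ∧ x ∉ acc.1 := by
  induction ps generalizing acc with
  | nil => exact Or.inl h
  | cons p ps ih =>
    rw [innerA_cons] at h ⊢
    by_cases hp : p ∈ acc.1
    · rw [if_pos ((PySem.Set.contains_iff _ _).mpr hp)] at h ⊢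
      exact ih h
    · rw [if_neg (by simpa using hp)] at h ⊢
      refine Or.inr ⟨p, innerA_mono (by simp [PySem.Set.mem_add]), hp⟩

def pvFoldA (l : List String) (acc : PySem.Set String × Bool) : PySem.Set String × Bool :=
  l.foldl (fun a cell => pvInnerA a (pvDagGet cell)) acc

lemma passA_eq (s : PySem.Set String) : pvPassA s = pvFoldA s (s, false) := rfl

lemma foldA_mono {l : List String} {acc : PySem.Set String × Bool} {x : String}
    (hx : x ∈ acc.1) : x ∈ (pvFoldA l acc).1 := by
  induction l generalizing acc with
  | nil => exact hx
  | cons c l ih => exact ih (innerA_mono hx)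

lemma foldA_sub {l : List String} {acc : PySem.Set String × Bool} {x : String}
    (hx : x ∈ (pvFoldA l acc).1) : x ∈ acc.1 ∨ ∃ c ∈ l, x ∈ pvDagGet c := by
  induction l generalizing acc with
  | nil => exact Or.inl hx
  | cons c l ih =>
    rcases ih hx with h | ⟨c', hc', hx'⟩
    · rcases innerA_sub h with h | h
      · exact Or.inl h
      · exact Or.inr ⟨c, by simp, h⟩
    · exact Or.inr ⟨c', by simp [hc'], hx'⟩

lemma foldA_false {l : List String} {acc : PySem.Set String × Bool}
    (h : (pvFoldA l acc).2 = false) :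
    pvFoldA l acc = acc ∧ ∀ c ∈ l, ∀ p ∈ pvDagGet c, p ∈ acc.1 := by
  induction l generalizing acc with
  | nil => exact ⟨rfl, by simp⟩
  | cons c l ih =>
    have step : pvFoldA (c :: l) acc = pvFoldA l (pvInnerA acc (pvDagGet c)) := rfl
    rw [step] at h ⊢
    obtain ⟨h1, h2⟩ := ih h
    have hif : (pvInnerA acc (pvDagGet c)).2 = false := by rw [h1] at h; exact h
    obtain ⟨h3, h4⟩ := innerA_false hif
    refine ⟨by rw [h1, h3], ?_⟩
    intro c' hc' p hp
    rcases List.mem_cons.mp hc' with rfl | hc'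
    · exact h4 p hp
    · have := h2 c' hc' p hp
      rw [h3] at this; exact this

lemma foldA_new {l : List String} {acc : PySem.Set String × Bool}
    (h : (pvFoldA l acc).2 = true) :
    acc.2 = true ∨ ∃ x, x ∈ (pvFoldA l acc).1 ∧ x ∉ acc.1 := by
  induction l generalizing acc with
  | nil => exact Or.inl h
  | cons c l ih =>
    have step : pvFoldA (c :: l) acc = pvFoldA l (pvInnerA acc (pvDagGet c)) := rfl
    rw [step] at h ⊢
    rcases ih h with h' | ⟨x, hx1, hx2⟩
    · rcases innerA_new h' with h'' | ⟨x, hx1, hx2⟩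
      · exact Or.inl h''
      · exact Or.inr ⟨x, foldA_mono hx1, hx2⟩
    · exact Or.inr ⟨x, hx1, fun hxa => hx2 (innerA_mono hxa)⟩

lemma pvWhileA_mono {n : Nat} {s : PySem.Set String} {x : String}
    (hx : x ∈ s) : x ∈ pvWhileA n s := by
  induction n generalizing s with
  | zero => exact hx
  | succ n ih =>
    rw [pvWhileA]
    have hp : x ∈ (pvPassA s).1 := by rw [passA_eq]; exact foldA_mono hx
    split
    · exact ih hp
    · exact hp

lemma pvWhileA_sound {P : String → Prop} {n : Nat} {s : PySem.Set String}
    (hbase : ∀ x ∈ s, P x) (hrule : ∀ c x, P c → x ∈ pvDagGet c → P x) :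
    ∀ x ∈ pvWhileA n s, P x := by
  induction n generalizing s with
  | zero => exact hbase
  | succ n ih =>
    have hpass : ∀ x ∈ (pvPassA s).1, P x := by
      intro x hx
      rw [passA_eq] at hx
      rcases foldA_sub hx with h | ⟨c, hc, hx'⟩
      · exact hbase x h
      · exact hrule c x (hbase c hc) hx'
    rw [pvWhileA]
    split
    · exact ih hpass
    · exact hpass

lemma pvWhileA_closed {n : Nat} {s : PySem.Set String} (hn : 12 < pvCnt s + n) :
    ∀ c ∈ pvWhileA n s, ∀ p ∈ pvDagGet c, p ∈ pvWhileA n s := by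
  induction n generalizing s with
  | zero => exact absurd hn (by have := pvCnt_le s; omega)
  | succ n ih =>
    rw [pvWhileA]
    cases hch : (pvPassA s).2 with
    | false =>
      rw [if_neg (by simp)]
      rw [passA_eq] at hch ⊢
      obtain ⟨h1, h2⟩ := foldA_false hch
      rw [h1]
      intro c hc p hp
      exact h2 c hc p hp
    | true =>
      rw [if_pos rfl]
      apply ih
      rw [passA_eq] at hch
      rcases foldA_new hch with h | ⟨x, hx1, hx2⟩
      · cases h
      · have hx1' : x ∈ (pvPassA s).1 := by rw [passA_eq]; exact hx1
        have hxc : x ∈ pvCellOrder := by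
          rcases foldA_sub hx1 with h | ⟨c, _, hx'⟩
          · exact absurd h hx2
          · exact pvDagGet_mem hx'
        have hlt : pvCnt s < pvCnt (pvPassA s).1 :=
          pvCnt_lt (fun y hy => by rw [passA_eq]; exact foldA_mono hy) hx1' hx2 hxc
        omega

lemma pvFilter_or_length {l : List String} (hnd : l.Nodup) {p : String} (hp : p ∈ l)
    {q : String → Prop} [DecidablePred q] (hqp : ¬ q p) :
    (l.filter (fun c => decide (q c) || decide (c = p))).length
      = (l.filter (fun c => decide (q c))).length + 1 := by
  induction l with
  | nil => cases hp
  | cons c l ih =>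
    by_cases hcp : c = p
    · subst hcp
      have hpl : c ∉ l := (List.nodup_cons.mp hnd).1
      have hcg : l.filter (fun x => decide (q x) || decide (x = c)) = l.filter (fun x => decide (q x)) :=
        List.filter_congr (fun x hx => by
          have : x ≠ c := fun h => hpl (h ▸ hx)
          simp [this])
      simp [hqp, hcg]
    · have hnd' := (List.nodup_cons.mp hnd).2
      have hp' : p ∈ l := (List.mem_cons.mp hp).resolve_left (fun h => hcp h.symm)
      by_cases hqc : q c
      · simp [hqc, ih hnd' hp']
      · simp [hqc, hcp, ih hnd' hp']

lemma pvCnt_add {s : PySem.Set String} {p : String} (hps : p ∉ s) (hpc : p ∈ pvCellOrder) :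
    pvCnt (PySem.Set.add s p) = pvCnt s + 1 := by
  unfold pvCnt
  have hcg : pvCellOrder.filter (fun c => decide (c ∈ PySem.Set.add s p)) =
      pvCellOrder.filter (fun c => decide (c ∈ s) || decide (c = p)) :=
    List.filter_congr (fun c _ => by simp [PySem.Set.mem_add])
  rw [hcg]
  exact pvFilter_or_length (by decide) hpc hps

lemma innerB_cons (acc : PySem.Set String × List String) (p : String) (ps : List String) :
    pvInnerB acc (p :: ps) =
      pvInnerB (if PySem.Set.contains acc.1 p then acc else (PySem.Set.add acc.1 p, p :: acc.2)) ps := rfl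

lemma innerB_mono {ps : List String} {acc : PySem.Set String × List String} {x : String}
    (hx : x ∈ acc.1) : x ∈ (pvInnerB acc ps).1 := by
  induction ps generalizing acc with
  | nil => exact hx
  | cons p ps ih =>
    rw [innerB_cons]
    split
    · exact ih hx
    · exact ih (by simp [PySem.Set.mem_add, hx])

lemma innerB_sub {ps : List String} {acc : PySem.Set String × List String} {x : String}
    (hx : x ∈ (pvInnerB acc ps).1) : x ∈ acc.1 ∨ x ∈ ps := by
  induction ps generalizing acc with
  | nil => exact Or.inl hx
  | cons p ps ih =>
    rw [innerB_cons] at hx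
    rcases ih hx with h | h
    · split at h
      · exact Or.inl h
      · simp only [PySem.Set.mem_add] at h
        rcases h with h | h
        · exact Or.inl h
        · exact Or.inr (by simp [h])
    · exact Or.inr (by simp [h])

lemma innerB_cover {ps : List String} {acc : PySem.Set String × List String} {p : String}
    (hp : p ∈ ps) : p ∈ (pvInnerB acc ps).1 := by
  induction ps generalizing acc with
  | nil => cases hp
  | cons q ps ih =>
    rw [innerB_cons]
    rcases List.mem_cons.mp hp with rfl | h
    · by_cases hq : p ∈ acc.1
      · rw [if_pos ((PySem.Set.contains_iff _ _).mpr hq)]; exact innerB_mono hq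
      · rw [if_neg (by simpa using hq)]
        exact innerB_mono (by simp [PySem.Set.mem_add])
    · exact ih h

lemma innerB_stack_mono {ps : List String} {acc : PySem.Set String × List String} {x : String}
    (hx : x ∈ acc.2) : x ∈ (pvInnerB acc ps).2 := by
  induction ps generalizing acc with
  | nil => exact hx
  | cons p ps ih =>
    rw [innerB_cons]
    split
    · exact ih hx
    · exact ih (by simp [hx])

lemma innerB_stack_sub {ps : List String} {acc : PySem.Set String × List String} {x : String}
    (hx : x ∈ (pvInnerB acc ps).2) : x ∈ acc.2 ∨ x ∈ (pvInnerB acc ps).1 := by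
  induction ps generalizing acc with
  | nil => exact Or.inl hx
  | cons p ps ih =>
    rw [innerB_cons] at hx ⊢
    by_cases hp : p ∈ acc.1
    · rw [if_pos ((PySem.Set.contains_iff _ _).mpr hp)] at hx ⊢
      exact ih hx
    · rw [if_neg (by simpa using hp)] at hx ⊢
      rcases ih hx with h | h
      · rcases List.mem_cons.mp h with rfl | h'
        · exact Or.inr (innerB_mono (by simp [PySem.Set.mem_add]))
        · exact Or.inl h'
      · exact Or.inr h

lemma innerB_new_on_stack {ps : List String} {acc : PySem.Set String × List String} {x : String}
    (hx : x ∈ (pvInnerB acc ps).1) : x ∈ acc.1 ∨ x ∈ (pvInnerB acc ps).2 := by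
  induction ps generalizing acc with
  | nil => exact Or.inl hx
  | cons p ps ih =>
    rw [innerB_cons] at hx ⊢
    by_cases hp : p ∈ acc.1
    · rw [if_pos ((PySem.Set.contains_iff _ _).mpr hp)] at hx ⊢
      exact ih hx
    · rw [if_neg (by simpa using hp)] at hx ⊢
      rcases ih hx with h | h
      · simp only [PySem.Set.mem_add] at h
        rcases h with h | rfl
        · exact Or.inl h
        · exact Or.inr (innerB_stack_mono (by simp))
      · exact Or.inr h

lemma innerB_count {ps : List String} (hps : ∀ p ∈ ps, p ∈ pvCellOrder) :
    ∀ acc : PySem.Set String × List String,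
    pvCnt (pvInnerB acc ps).1 + acc.2.length = pvCnt acc.1 + (pvInnerB acc ps).2.length := by
  induction ps with
  | nil => intro acc; rfl
  | cons p ps ih =>
    intro acc
    rw [innerB_cons]
    by_cases hp : p ∈ acc.1
    · rw [if_pos ((PySem.Set.contains_iff _ _).mpr hp)]
      exact ih (fun q hq => hps q (by simp [hq])) acc
    · rw [if_neg (by simpa using hp)]
      have := ih (fun q hq => hps q (by simp [hq])) (PySem.Set.add acc.1 p, p :: acc.2)
      simp only [List.length_cons] at this
      rw [pvCnt_add hp (hps p (by simp))] at this
      omega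

lemma pvLoopB_mono {n : Nat} {seen : PySem.Set String} {stack : List String} {x : String}
    (hx : x ∈ seen) : x ∈ pvLoopB n seen stack := by
  induction n generalizing seen stack with
  | zero => exact hx
  | succ n ih =>
    cases stack with
    | nil => exact hx
    | cons cell rest => exact ih (innerB_mono hx)

lemma pvLoopB_sound {P : String → Prop} {n : Nat} {seen : PySem.Set String} {stack : List String}
    (hstk : ∀ x ∈ stack, x ∈ seen) (hbase : ∀ x ∈ seen, P x)
    (hrule : ∀ c x, P c → x ∈ pvDagGet c → P x) :
    ∀ x ∈ pvLoopB n seen stack, P x := by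
  induction n generalizing seen stack with
  | zero => exact hbase
  | succ n ih =>
    cases stack with
    | nil => exact hbase
    | cons cell rest =>
      rw [pvLoopB]
      have hcell : P cell := hbase cell (hstk cell (by simp))
      have hbase' : ∀ x ∈ (pvInnerB (seen, rest) (pvDagGet cell)).1, P x := by
        intro x hx
        rcases innerB_sub hx with h | h
        · exact hbase x h
        · exact hrule cell x hcell h
      refine ih ?_ hbase'
      intro x hx
      rcases innerB_stack_sub hx with h | h
      · exact innerB_mono (hstk x (by simp [h]))
      · exact h

lemma pvLoopB_closed {n : Nat} {seen : PySem.Set String} {stack : List String}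
    (hstk : ∀ x ∈ stack, x ∈ seen)
    (hinv : ∀ x ∈ seen, x ∈ stack ∨ ∀ y ∈ pvDagGet x, y ∈ seen)
    (hn : stack.length + 12 < n + pvCnt seen) :
    ∀ c ∈ pvLoopB n seen stack, ∀ p ∈ pvDagGet c, p ∈ pvLoopB n seen stack := by
  induction n generalizing seen stack with
  | zero => exact absurd hn (by have := pvCnt_le seen; omega)
  | succ n ih =>
    cases stack with
    | nil =>
      intro c hc p hp
      rcases hinv c hc with h | h
      · cases h
      · exact h p hp
    | cons cell rest =>
      rw [pvLoopB]
      have hdag : ∀ p ∈ pvDagGet cell, p ∈ pvCellOrder := fun p hp => pvDagGet_mem hp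
      have hcount := innerB_count hdag (seen, rest)
      dsimp only at hcount
      apply ih
      · intro x hx
        rcases innerB_stack_sub hx with h | h
        · exact innerB_mono (hstk x (by simp [h]))
        · exact h
      · intro x hx
        rcases innerB_new_on_stack hx with h | h
        · rcases hinv x h with h' | h'
          · rcases List.mem_cons.mp h' with rfl | h''
            · exact Or.inr (fun y hy => innerB_cover hy)
            · exact Or.inl (innerB_stack_mono h'')
          · exact Or.inr (fun y hy => innerB_mono (h' y hy))
        · exact Or.inl h
      · simp only [List.length_cons] at hn
        omega

lemma pvMem_iff (t : List String) (x : String) :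
    x ∈ pvWhileA 13 (PySem.Set.ofList t) ↔
    x ∈ pvLoopB (t.length + 13) (PySem.Set.ofList t) t.reverse := by
  have hstk0 : ∀ y ∈ t.reverse, y ∈ PySem.Set.ofList t := by
    intro y hy; rw [PySem.Set.mem_ofList]; exact List.mem_reverse.mp hy
  have hinv0 : ∀ y ∈ PySem.Set.ofList t, y ∈ t.reverse ∨ ∀ z ∈ pvDagGet y, z ∈ PySem.Set.ofList t := by
    intro y hy; exact Or.inl (List.mem_reverse.mpr ((PySem.Set.mem_ofList _ _).mp hy))
  have hnB : t.reverse.length + 12 < (t.length + 13) + pvCnt (PySem.Set.ofList t) := by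
    simp only [List.length_reverse]; omega
  have hclosedB := pvLoopB_closed hstk0 hinv0 hnB
  have hclosedA := pvWhileA_closed (n := 13) (s := PySem.Set.ofList t) (by omega)
  constructor
  · intro hx
    exact pvWhileA_sound (fun y hy => pvLoopB_mono hy)
      (fun c y hc hy => hclosedB c hc y hy) x hx
  · intro hx
    exact pvLoopB_sound hstk0 (fun y hy => pvWhileA_mono hy)
      (fun c y hc hy => hclosedA c hc y hy) x hx

lemma pvClosed_eq (t : List String) :
    close_under_prerequisites t =
      pvCellOrder.filter (fun c => PySem.Set.contains (pvLoopB (t.length + 13) (PySem.Set.ofList t) t.reverse) c) := by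
  unfold close_under_prerequisites
  apply List.filter_congr
  intro c _
  by_cases h : c ∈ pvWhileA 13 (PySem.Set.ofList t)
  · rw [(PySem.Set.contains_iff _ _).mpr h, (PySem.Set.contains_iff _ _).mpr ((pvMem_iff t c).mp h)]
  · have h2 : c ∉ pvLoopB (t.length + 13) (PySem.Set.ofList t) t.reverse :=
      fun hb => h ((pvMem_iff t c).mpr hb)
    cases hb : PySem.Set.contains (pvWhileA 13 (PySem.Set.ofList t)) c with
    | true => exact absurd ((PySem.Set.contains_iff _ _).mp hb) h
    | false =>
      cases hb2 : PySem.Set.contains (pvLoopB (t.length + 13) (PySem.Set.ofList t) t.reverse) c with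
      | true => exact absurd ((PySem.Set.contains_iff _ _).mp hb2) h2
      | false => rfl

lemma pvFoldFI (f : String → Bool) (l : List String) :
    ∀ acc : List String × List String,
    l.foldl (fun acc cell => if f cell then (acc.1 ++ [cell], acc.2) else (acc.1, acc.2 ++ [cell])) acc
      = (acc.1 ++ l.filter f, acc.2 ++ l.filter (fun c => !f c)) := by
  induction l with
  | nil => intro acc; simp
  | cons c l ih =>
    intro acc
    by_cases hc : f c = true
    · simp only [List.foldl_cons, ih, List.filter_cons, hc]
      simp
    · have hc' : f c = false := by cases h : f c; rfl; exact absurd h hc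
      simp only [List.foldl_cons, ih, List.filter_cons, hc]
      simp

lemma pvOk_eq (cell : String) (anatomy : List (String × List String)) :
    (check_structural_feasibility cell anatomy).1 = pvOk cell anatomy := by
  have hmk : pvStructuralReqs =
      PySem.Dict.mk [("C2", pvReqC2), ("D1", pvReqD1), ("D3", pvReqD3)] := by
    simp [pvStructuralReqs, PySem.Dict.ofList, PySem.Dict.update, PySem.Dict.insert,
          PySem.Dict.contains, PySem.Dict.empty]
  unfold check_structural_feasibility
  rw [hmk]
  by_cases h2 : cell = "C2"
  · subst h2
    rw [show pvOk "C2" anatomy = pvReqC2 (PySem.Dict.mk anatomy) from rfl]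
    simp only [PySem.Dict.get?_mk_cons]
    norm_num
    cases hh : pvReqC2 (PySem.Dict.mk anatomy) <;> simp [*]
  · by_cases h3 : cell = "D1"
    · subst h3
      rw [show pvOk "D1" anatomy = pvReqD1 (PySem.Dict.mk anatomy) from rfl]
      simp only [PySem.Dict.get?_mk_cons]
      norm_num
      cases hh : pvReqD1 (PySem.Dict.mk anatomy) <;> simp [*]
    · by_cases h4 : cell = "D3"
      · subst h4
        rw [show pvOk "D3" anatomy = pvReqD3 (PySem.Dict.mk anatomy) from rfl]
        simp only [PySem.Dict.get?_mk_cons]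
        norm_num
        cases hh : pvReqD3 (PySem.Dict.mk anatomy) <;> simp [*]
      · have e2 : ("C2" == cell) = false := beq_eq_false_iff_ne.mpr (Ne.symm h2)
        have e3 : ("D1" == cell) = false := beq_eq_false_iff_ne.mpr (Ne.symm h3)
        have e4 : ("D3" == cell) = false := beq_eq_false_iff_ne.mpr (Ne.symm h4)
        have hok : pvOk cell anatomy = true := by
          unfold pvOk
          rw [if_neg (by rw [beq_eq_false_iff_ne.mpr h2]; simp),
              if_neg (by rw [beq_eq_false_iff_ne.mpr h3]; simp),
              if_neg (by rw [beq_eq_false_iff_ne.mpr h4]; simp)]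
        rw [hok]
        simp [e2, e3, e4, PySem.Dict.get?]

theorem pvMain (t : List String) (a : List (String × List String)) :
    compute_feasible_target t a = compute_feasible_target_alt t a := by
  unfold compute_feasible_target compute_feasible_target_alt
  dsimp only
  rw [pvClosed_eq]
  have h1 : ∀ L : List String,
      L.foldl (fun (acc : List String × List String) cell =>
        if (check_structural_feasibility cell a).1 then (acc.1 ++ [cell], acc.2)
        else (acc.1, acc.2 ++ [cell])) ([], [])
      = (L.filter (fun c => pvOk c a), L.filter (fun c => !pvOk c a)) := by
    intro L
    have h2 : L.foldl (fun (acc : List String × List String) cell =>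
        if (check_structural_feasibility cell a).1 then (acc.1 ++ [cell], acc.2)
        else (acc.1, acc.2 ++ [cell])) ([], [])
        = L.foldl (fun (acc : List String × List String) cell =>
        if pvOk cell a then (acc.1 ++ [cell], acc.2)
        else (acc.1, acc.2 ++ [cell])) ([], []) :=
      PySem.List.foldl_congr_mem _ _ _ _ (fun acc x _ => by rw [pvOk_eq])
    rw [h2, pvFoldFI (fun c => pvOk c a) L ([], [])]
    simp
  rw [h1]

-- ===== VERDICT (by name: the statement is the Claim_ definition above) =====
theorem compute_feasible_target_spec : Claim_equal_compute_feasible_target := by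
  intro target_cells anatomy _
  unfold Spec_compute_feasible_target
  exact pvMain target_cells anatomy
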